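-- pv_equiv track=rewrite | github.com/tcotte/Jobshop | scripts/solvers/descent_solver.py | extractBlocksCriticalPath
-- ===== SOURCE A (Python) =====
-- def extractBlocksCriticalPath(critiques, n, m, machines):
--     blocks = []
--
--     list_mac = []  # debug
--
--     bloc = []
--
--     prec_mac = machines[critiques[0]]  # initialisation
--     bloc.append(critiques[0])
--
--     list_mac.append(machines[critiques[0]])
--
--     for i in range(1, len(critiques)):
--         j, o = critiques[i]
--         if prec_mac == machines[j, o]:
--             bloc.append(critiques[i])
--         else:
--             blocks.append(bloc)  # on ajoute l'ancien bloc
--             bloc = [critiques[i]]  # on en commence un nouveau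
--
--         prec_mac = machines[j, o]  # mise à jour machine prcedente
--         list_mac.append(machines[critiques[i]])
--
--     blocks.append(bloc)  # on ajoute le dernier bloc
--
--     blocks = [b for b in blocks if len(b) > 1]  # on enleve les blocs de taille <2
--
--     return blocks, list_mac
-- ===== SOURCE B (Python) =====
-- def extractBlocksCriticalPath(critiques, n, m, machines):
--     list_mac = [machines[c] for c in critiques]
--     blocks = []
--     i = 0
--     while i < len(list_mac):
--         j = i + 1
--         while j < len(list_mac) and list_mac[j] == list_mac[i]:
--             j += 1
--         if j - i > 1:
--             blocks.append(critiques[i:j])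
--         i = j
--     return blocks, list_mac
-- ===== Notes on version B (the rewrite author's own statement) =====
-- stated objective: alternative
-- what changed: B precomputes list_mac once, then finds each block with a two-pointer index scan that slices runs out of critiques and filters short runs inline, replacing A's prec_mac/bloc accumulator fold with a trailing length filter.
-- crash fix: On empty critiques A raises IndexError at machines[critiques[0]] while B naturally returns ([], []). — e.g. on extractBlocksCriticalPath([], 0, 0, []): A raises IndexError, B returns ([], [])
import Mathlib
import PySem

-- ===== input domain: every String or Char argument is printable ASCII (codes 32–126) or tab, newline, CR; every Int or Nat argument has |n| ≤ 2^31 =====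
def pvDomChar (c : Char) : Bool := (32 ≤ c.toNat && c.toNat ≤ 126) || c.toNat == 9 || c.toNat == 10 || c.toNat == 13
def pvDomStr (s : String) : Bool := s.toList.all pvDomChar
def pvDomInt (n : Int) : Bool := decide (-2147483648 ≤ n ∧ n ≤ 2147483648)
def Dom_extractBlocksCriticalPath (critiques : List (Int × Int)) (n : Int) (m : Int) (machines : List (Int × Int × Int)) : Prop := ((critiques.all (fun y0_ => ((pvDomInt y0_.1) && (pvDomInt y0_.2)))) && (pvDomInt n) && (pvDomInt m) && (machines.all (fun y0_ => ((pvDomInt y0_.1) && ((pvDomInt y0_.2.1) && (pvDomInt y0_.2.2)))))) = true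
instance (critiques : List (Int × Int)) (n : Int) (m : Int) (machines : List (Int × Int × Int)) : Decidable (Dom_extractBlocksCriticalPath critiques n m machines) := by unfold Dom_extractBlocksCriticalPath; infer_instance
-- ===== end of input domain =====

-- B replaces A's prec_mac/bloc boundary-tracking fold and post-filter by a precomputed
-- machine list and a two-pointer scan that slices each run out and filters inline (objective: alternative).

-- dict lookup machines[(j,o)] (first match; Python raises KeyError when absent — excluded by Pre_)
def lookupM (machines : List (Int × Int × Int)) (c : Int × Int) : Int :=
  match machines.find? (fun e => e.1 == c.1 && e.2.1 == c.2) with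
  | some e => e.2.2
  | none => 0

-- ===== PORT A =====
-- the body of A's for-loop: state = (blocks, bloc, prec_mac, list_mac)
def stepA (machines : List (Int × Int × Int))
    (st : List (List (Int × Int)) × List (Int × Int) × Int × List Int) (c : Int × Int) :
    List (List (Int × Int)) × List (Int × Int) × Int × List Int :=
  let mc := lookupM machines c
  if st.2.2.1 = mc then (st.1, st.2.1 ++ [c], mc, st.2.2.2 ++ [mc])
  else (st.1 ++ [st.2.1], [c], mc, st.2.2.2 ++ [mc])

def extractBlocksCriticalPath (critiques : List (Int × Int)) (n : Int) (m : Int) (machines : List (Int × Int × Int)) : (List (List (Int × Int))) × List Int :=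
  match critiques with
  | [] => ([], [])  -- Python raises IndexError on critiques[0]; excluded by Pre_
  | c0 :: rest =>
    let k0 := lookupM machines c0
    let st := rest.foldl (stepA machines) ([], [c0], k0, [k0])
    ((st.1 ++ [st.2.1]).filter (fun b => decide (1 < b.length)), st.2.2.2)

-- ===== PORT B =====
-- inner while: advance j while list_mac[j] == v (v = list_mac[i])
def runEnd (lm : List Int) (v : Int) (j : Nat) : Nat :=
  if h : j < lm.length ∧ lm.getD j 0 = v then runEnd lm v (j + 1) else j
termination_by lm.length - j
decreasing_by exact Nat.sub_succ_lt_self _ _ h.1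

-- termination of the outer while-loop port needs j ≥ i + 1
theorem runEnd_ge (lm : List Int) (v : Int) (j : Nat) : j ≤ runEnd lm v j := by
  fun_induction runEnd lm v j with
  | case1 j h ih => omega
  | case2 j h => omega

-- outer while: i jumps to the end of the current run; run sliced out if length > 1
def blocksFrom (critiques : List (Int × Int)) (lm : List Int) (i : Nat) : List (List (Int × Int)) :=
  if h : i < lm.length then
    let j := runEnd lm (lm.getD i 0) (i + 1)
    (if 1 < j - i then [(critiques.drop i).take (j - i)] else []) ++ blocksFrom critiques lm j
  else []
termination_by lm.length - i
decreasing_by exact Nat.sub_lt_sub_left h (Nat.lt_of_lt_of_le (Nat.lt_succ_self i) (runEnd_ge lm (lm.getD i 0) (i + 1)))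

def extractBlocksCriticalPath_alt (critiques : List (Int × Int)) (n : Int) (m : Int) (machines : List (Int × Int × Int)) : (List (List (Int × Int))) × List Int :=
  let lm := critiques.map (lookupM machines)
  (blocksFrom critiques lm 0, lm)

-- ===== PRECONDITION & SPEC =====
-- Pre_ is exactly where Python A returns: critiques nonempty (else IndexError) and every
-- critique a key of machines (else KeyError).
def Pre_extractBlocksCriticalPath (critiques : List (Int × Int)) (n : Int) (m : Int) (machines : List (Int × Int × Int)) : Prop :=
  critiques ≠ [] ∧ ∀ c ∈ critiques, (machines.find? (fun e => e.1 == c.1 && e.2.1 == c.2)).isSome = true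
instance (critiques : List (Int × Int)) (n : Int) (m : Int) (machines : List (Int × Int × Int)) : Decidable (Pre_extractBlocksCriticalPath critiques n m machines) := by unfold Pre_extractBlocksCriticalPath; infer_instance

def pvWitness_extractBlocksCriticalPath : (List (Int × Int)) × Int × Int × (List (Int × Int × Int)) :=
  ([(0, 0), (0, 1), (1, 0)], 2, 2, [(0, 0, 5), (0, 1, 5), (1, 0, 3)])

-- On empty critiques A raises IndexError while B naturally returns ([], []).
def Raises_extractBlocksCriticalPath (critiques : List (Int × Int)) (n : Int) (m : Int) (machines : List (Int × Int × Int)) : Prop :=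
  critiques = []
instance (critiques : List (Int × Int)) (n : Int) (m : Int) (machines : List (Int × Int × Int)) : Decidable (Raises_extractBlocksCriticalPath critiques n m machines) := by unfold Raises_extractBlocksCriticalPath; infer_instance
def pvRaiseWitness_extractBlocksCriticalPath : (List (Int × Int)) × Int × Int × (List (Int × Int × Int)) := ([], 0, 0, [])
def pvRaiseWitnessOut_extractBlocksCriticalPath : (List (List (Int × Int))) × List Int := ([], [])

def Spec_extractBlocksCriticalPath (critiques : List (Int × Int)) (n : Int) (m : Int) (machines : List (Int × Int × Int)) (out : (List (List (Int × Int))) × List Int) : Prop := out = extractBlocksCriticalPath_alt critiques n m machines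
instance (critiques : List (Int × Int)) (n : Int) (m : Int) (machines : List (Int × Int × Int)) (out : (List (List (Int × Int))) × List Int) : Decidable (Spec_extractBlocksCriticalPath critiques n m machines out) := by unfold Spec_extractBlocksCriticalPath; infer_instance

-- ===== CLAIM (what is proved, stated in full; the proofs are below) =====
def Claim_equal_extractBlocksCriticalPath : Prop := ∀ (critiques : List (Int × Int)) (n : Int) (m : Int) (machines : List (Int × Int × Int)), Dom_extractBlocksCriticalPath critiques n m machines → Pre_extractBlocksCriticalPath critiques n m machines → Spec_extractBlocksCriticalPath critiques n m machines (extractBlocksCriticalPath critiques n m machines)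

def Claim_raises_extractBlocksCriticalPath : Prop := (∀ (critiques : List (Int × Int)) (n : Int) (m : Int) (machines : List (Int × Int × Int)), Dom_extractBlocksCriticalPath critiques n m machines → Raises_extractBlocksCriticalPath critiques n m machines → ¬ Pre_extractBlocksCriticalPath critiques n m machines) ∧ (Dom_extractBlocksCriticalPath (pvRaiseWitness_extractBlocksCriticalPath.1) (pvRaiseWitness_extractBlocksCriticalPath.2.1) (pvRaiseWitness_extractBlocksCriticalPath.2.2.1) (pvRaiseWitness_extractBlocksCriticalPath.2.2.2) ∧ Raises_extractBlocksCriticalPath (pvRaiseWitness_extractBlocksCriticalPath.1) (pvRaiseWitness_extractBlocksCriticalPath.2.1) (pvRaiseWitness_extractBlocksCriticalPath.2.2.1) (pvRaiseWitness_extractBlocksCriticalPath.2.2.2) ∧ extractBlocksCriticalPath_alt (pvRaiseWitness_extractBlocksCriticalPath.1) (pvRaiseWitness_extractBlocksCriticalPath.2.1) (pvRaiseWitness_extractBlocksCriticalPath.2.2.1) (pvRaiseWitness_extractBlocksCriticalPath.2.2.2) = pvRaiseWitnessOut_extractBlocksCriticalPath)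

-- ===== LEMMAS AND PROOFS =====

-- common spec: chop k x l = (continuation of the run containing x, the remaining runs)
def chop (k : Int × Int → Int) (x : Int × Int) : List (Int × Int) → List (Int × Int) × List (List (Int × Int))
  | [] => ([], [])
  | c :: cs =>
    let p := chop k c cs
    if k x = k c then (c :: p.1, p.2) else ([], (c :: p.1) :: p.2)

def runsOf (k : Int × Int → Int) : List (Int × Int) → List (List (Int × Int))
  | [] => []
  | c :: cs => (c :: (chop k c cs).1) :: (chop k c cs).2

theorem foldA_eq (machines : List (Int × Int × Int)) :
    ∀ (cs : List (Int × Int)) (blocks : List (List (Int × Int))) (b : List (Int × Int))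
      (x : Int × Int) (lm : List Int),
      ((cs.foldl (stepA machines) (blocks, b, lookupM machines x, lm)).1
          ++ [(cs.foldl (stepA machines) (blocks, b, lookupM machines x, lm)).2.1]
        = blocks ++ (b ++ (chop (lookupM machines) x cs).1) :: (chop (lookupM machines) x cs).2)
      ∧ (cs.foldl (stepA machines) (blocks, b, lookupM machines x, lm)).2.2.2
        = lm ++ cs.map (lookupM machines) := by
  intro cs
  induction cs with
  | nil => intro blocks b x lm; simp [chop]
  | cons c cs ih =>
    intro blocks b x lm
    simp only [List.foldl_cons, stepA, chop, List.map_cons]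
    by_cases h : lookupM machines x = lookupM machines c
    · simpa [h, List.append_assoc] using ih blocks (b ++ [c]) c (lm ++ [lookupM machines c])
    · simpa [h, List.append_assoc] using ih (blocks ++ [b]) [c] c (lm ++ [lookupM machines c])

theorem chop_fst (k : Int × Int → Int) : ∀ (l : List (Int × Int)) (x : Int × Int),
    (chop k x l).1 = l.takeWhile (fun c => k x == k c) := by
  intro l
  induction l with
  | nil => intro x; simp [chop]
  | cons c cs ih =>
    intro x
    by_cases h : k x = k c
    · have hp : (fun z => k x == k z) = (fun z => k c == k z) := by funext z; rw [h]
      simp [chop, List.takeWhile_cons, h, hp, ih c]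
    · simp [chop, List.takeWhile_cons, h]

theorem chop_snd_runs (k : Int × Int → Int) : ∀ (l : List (Int × Int)) (x : Int × Int),
    runsOf k (l.drop (chop k x l).1.length) = (chop k x l).2 := by
  intro l
  induction l with
  | nil => intro x; simp [chop, runsOf]
  | cons c cs ih =>
    intro x
    by_cases h : k x = k c
    · simpa [chop, h] using ih c
    · simp [chop, h, runsOf]

theorem runEnd_eq (k : Int × Int → Int) (critiques : List (Int × Int)) (v : Int) (j : Nat) :
    runEnd (critiques.map k) v j
      = j + ((critiques.drop j).takeWhile (fun c => v == k c)).length := by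
  fun_induction runEnd (critiques.map k) v j with
  | case1 j h ih =>
    have hj : j < critiques.length := by simpa using h.1
    have hv : k critiques[j] = v := by
      have := h.2
      simpa [List.getD, List.getElem?_map, List.getElem?_eq_getElem hj] using this
    rw [ih, List.drop_eq_getElem_cons hj, List.takeWhile_cons]
    simp [hv]
    omega
  | case2 j h =>
    by_cases hj : j < critiques.length
    · have hv : ¬ ((critiques.map k).getD j 0 = v) := by
        intro hc; exact h ⟨by simpa using hj, hc⟩
      have hv' : ¬ (k critiques[j] = v) := by
        intro hc; apply hv
        simpa [List.getD, List.getElem?_map, List.getElem?_eq_getElem hj] using hc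
      rw [List.drop_eq_getElem_cons hj, List.takeWhile_cons]
      simp
      exact fun hc => hv' hc.symm
    · rw [List.drop_eq_nil_of_le (by omega)]
      simp

theorem blocksFrom_cons (critiques : List (Int × Int)) (lm : List Int) (i : Nat)
    (h : i < lm.length) :
    blocksFrom critiques lm i
      = (if 1 < runEnd lm (lm.getD i 0) (i + 1) - i then
            [(critiques.drop i).take (runEnd lm (lm.getD i 0) (i + 1) - i)] else [])
          ++ blocksFrom critiques lm (runEnd lm (lm.getD i 0) (i + 1)) := by
  rw [blocksFrom, dif_pos h]

theorem blocksFrom_eq (k : Int × Int → Int) (critiques : List (Int × Int)) :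
    ∀ (N i : Nat), critiques.length - i ≤ N →
      blocksFrom critiques (critiques.map k) i
        = (runsOf k (critiques.drop i)).filter (fun b => decide (1 < b.length)) := by
  intro N
  induction N with
  | zero =>
    intro i hi
    rw [blocksFrom, dif_neg (by simpa using Nat.not_lt.mpr (by omega))]
    rw [List.drop_eq_nil_of_le (by omega)]
    simp [runsOf]
  | succ N ih =>
    intro i hi
    by_cases hlt : i < critiques.length
    · rw [blocksFrom_cons critiques (critiques.map k) i (by simpa using hlt)]
      have hget : (critiques.map k).getD i 0 = k critiques[i] := by
        simp [List.getD, List.getElem?_map, List.getElem?_eq_getElem hlt]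
      set x := critiques[i] with hx
      set cs := critiques.drop (i + 1) with hcs
      have he : (chop k x cs).1 = cs.takeWhile (fun c => k x == k c) := chop_fst k cs x
      have hj : runEnd (critiques.map k) ((critiques.map k).getD i 0) (i + 1)
          = (i + 1) + (chop k x cs).1.length := by
        rw [hget, runEnd_eq, he]
      have htake : cs.take (chop k x cs).1.length = (chop k x cs).1 := by
        rw [he]; exact ((List.prefix_iff_eq_take).mp (List.takeWhile_prefix _)).symm
      have hdropi : critiques.drop i = x :: cs := List.drop_eq_getElem_cons hlt
      have hdropj : critiques.drop ((i + 1) + (chop k x cs).1.length) = cs.drop (chop k x cs).1.length := by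
        rw [hcs, List.drop_drop]
      rw [hj, hdropi]
      have hrec := ih ((i + 1) + (chop k x cs).1.length) (by omega)
      rw [hrec, hdropj, chop_snd_runs]
      have hruns : runsOf k (x :: cs) = (x :: (chop k x cs).1) :: (chop k x cs).2 := by
        simp [runsOf]
      rw [hruns]
      by_cases hpos : 0 < (chop k x cs).1.length
      · have h3 : i + 1 + (chop k x cs).1.length - i = (chop k x cs).1.length + 1 := by omega
        rw [if_pos (by omega : 1 < i + 1 + (chop k x cs).1.length - i)]
        rw [h3, List.take_succ_cons, htake, List.filter_cons]
        rw [if_pos (by simp; omega : decide (1 < ((x :: (chop k x cs).1) : List (Int × Int)).length) = true)]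
        simp
      · have hzero : (chop k x cs).1.length = 0 := by omega
        have hnil : (chop k x cs).1 = [] := by
          cases hc : (chop k x cs).1 with
          | nil => rfl
          | cons a l => rw [hc] at hzero; simp at hzero
        rw [if_neg (by omega : ¬ 1 < i + 1 + (chop k x cs).1.length - i), hnil, List.filter_cons]
        simp
    · rw [blocksFrom, dif_neg (by simpa using hlt)]
      rw [List.drop_eq_nil_of_le (by omega)]
      simp [runsOf]

-- ===== VERDICT (by name: the statement is the Claim_ definition above) =====
theorem extractBlocksCriticalPath_spec : Claim_equal_extractBlocksCriticalPath := by
  intro critiques n m machines hdom hpre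
  unfold Spec_extractBlocksCriticalPath
  obtain ⟨hne, -⟩ := hpre
  match critiques with
  | [] => exact absurd rfl hne
  | c0 :: rest =>
    simp only [extractBlocksCriticalPath, extractBlocksCriticalPath_alt]
    have hA := foldA_eq machines rest [] [c0] c0 [lookupM machines c0]
    have hB := blocksFrom_eq (lookupM machines) (c0 :: rest) (c0 :: rest).length 0 (by omega)
    refine Prod.ext ?_ ?_
    · show (_ ++ [_]).filter _ = blocksFrom _ _ 0
      rw [hA.1, hB]
      simp [runsOf]
    · show _ = (c0 :: rest).map (lookupM machines)
      rw [hA.2]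
      simp

theorem blocksFrom_nil : blocksFrom [] [] 0 = [] := by rw [blocksFrom]; simp

theorem extractBlocksCriticalPath_raises : Claim_raises_extractBlocksCriticalPath :=
  ⟨fun c n m ma _ hr hp => hp.1 hr, rfl, rfl,
    show (blocksFrom [] ([].map (lookupM [])) 0, [].map (lookupM [])) = (([] : List (List (Int × Int))), ([] : List Int)) from by
      simp only [List.map_nil, blocksFrom_nil]⟩

-- witness self-check: B's port indeed returns ([], []) at the raise witness
theorem pvRaiseWitness_ok :
    extractBlocksCriticalPath_alt (pvRaiseWitness_extractBlocksCriticalPath.1)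
      (pvRaiseWitness_extractBlocksCriticalPath.2.1)
      (pvRaiseWitness_extractBlocksCriticalPath.2.2.1)
      (pvRaiseWitness_extractBlocksCriticalPath.2.2.2)
      = pvRaiseWitnessOut_extractBlocksCriticalPath :=
  extractBlocksCriticalPath_raises.2.2.2
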